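-- pv_equiv track=rewrite | github.com/Borgerod/leetcode_submissions | problems/completed/167_two_sum_ii_input_array_is_sorted/two_sum_ii_input_array_is_sorted.py | listCompressor
-- ===== SOURCE A (Python) =====
-- def listCompressor(numbers:list[int]) -> list[int]:
--         _numbers = numbers.copy()
--         compressed_list = []
--         for x in range(2):
--             for i in sorted(set(_numbers)):
--                 if i in _numbers:
--                     _numbers.remove(i)
--                     compressed_list.append(i)
--         return compressed_list
-- ===== SOURCE B (Python) =====
-- def listCompressor(numbers: list[int]) -> list[int]:
--     s = sorted(numbers)
--     firsts = []
--     seconds = []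
--     prev = None
--     run = 0
--     for v in s:
--         if run > 0 and prev == v:
--             run += 1
--         else:
--             prev = v
--             run = 1
--         if run == 1:
--             firsts.append(v)
--         elif run == 2:
--             seconds.append(v)
--     return firsts + seconds
-- ===== Notes on version B (the rewrite author's own statement) =====
-- stated objective: faster
-- what changed: Replaces the two remove-one-occurrence passes over sorted(set(...)) (each with a linear membership test and list.remove inside the loop) by a single sort followed by one linear run-counting scan that appends first occurrences to one list and second occurrences to another.
import Mathlib
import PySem

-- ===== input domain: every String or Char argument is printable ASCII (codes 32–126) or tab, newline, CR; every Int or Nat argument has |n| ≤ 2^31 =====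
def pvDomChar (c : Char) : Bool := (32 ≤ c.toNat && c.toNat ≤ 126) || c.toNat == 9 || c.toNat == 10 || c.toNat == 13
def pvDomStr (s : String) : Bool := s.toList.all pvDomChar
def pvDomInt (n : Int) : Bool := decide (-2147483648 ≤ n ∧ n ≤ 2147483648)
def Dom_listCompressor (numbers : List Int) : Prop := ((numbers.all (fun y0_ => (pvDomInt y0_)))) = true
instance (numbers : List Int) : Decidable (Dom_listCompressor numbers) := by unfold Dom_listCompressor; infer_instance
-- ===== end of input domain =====

-- B replaces A's two remove-one-occurrence passes over sorted(set(...)) by one sort plus a single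
-- run-counting scan (objective: faster; A is quadratic, B sorts once and scans).


-- ===== PORT A =====
-- body of A's inner loop: 'if i in _numbers: _numbers.remove(i); compressed_list.append(i)'
-- (the 'none' arm of remove? is unreachable: it is guarded by the membership test)
def pvInnerA (st : List Int × List Int) (i : Int) : List Int × List Int :=
  if st.1.contains i then
    match PySem.List.remove? st.1 i with
    | some ns => (ns, st.2 ++ [i])
    | none => st
  else st

def listCompressor (numbers : List Int) : List Int :=
  let _numbers := numbers        -- _numbers = numbers.copy()  (A never mutates the caller's list)
  let st := (PySem.List.pyRange 0 2 1).foldl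
    (fun (st : List Int × List Int) _x =>
      (PySem.List.sorted (PySem.Set.ofList st.1) (fun i => i) false).foldl pvInnerA st)
    (_numbers, [])
  st.2

-- ===== PORT B =====
-- loop body of B: update the (prev, run) run tracker, then append to firsts/seconds
def pvStepB (st : List Int × List Int × Option Int × Int) (v : Int) :
    List Int × List Int × Option Int × Int :=
  let pr := if st.2.2.2 > 0 ∧ st.2.2.1 = some v then (st.2.2.1, st.2.2.2 + 1) else (some v, 1)
  if pr.2 = 1 then (st.1 ++ [v], st.2.1, pr.1, pr.2)
  else if pr.2 = 2 then (st.1, st.2.1 ++ [v], pr.1, pr.2)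
  else (st.1, st.2.1, pr.1, pr.2)

def listCompressor_alt (numbers : List Int) : List Int :=
  let s := PySem.List.sorted numbers (fun x => x) false
  let st := s.foldl pvStepB ([], [], none, 0)
  st.1 ++ st.2.1

-- ===== PRECONDITION & SPEC =====
def Spec_listCompressor (numbers : List Int) (out : List Int) : Prop := out = listCompressor_alt numbers
instance (numbers : List Int) (out : List Int) : Decidable (Spec_listCompressor numbers out) := by unfold Spec_listCompressor; infer_instance

-- ===== CLAIM (what is proved, stated in full; the proofs are below) =====
def Claim_equal_listCompressor : Prop := ∀ (numbers : List Int), Dom_listCompressor numbers → Spec_listCompressor numbers (listCompressor numbers)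

-- ===== LEMMAS AND PROOFS =====

-- canonical form used by the proofs: adjacent deduplication of a (sorted) list
def pvUniq : List Int → List Int
  | [] => []
  | v :: t => v :: pvUniq (t.dropWhile (fun x => decide (x = v)))
termination_by s => s.length
decreasing_by
  simpa using Nat.lt_succ_of_le (List.length_dropWhile_le _ t)

-- membership in pvUniq (any list: the dropped elements equal the kept head)
theorem mem_pvUniq (n : Nat) : ∀ (s : List Int), s.length ≤ n → ∀ w, (w ∈ pvUniq s ↔ w ∈ s) := by
  induction n with
  | zero =>
    intro s hs w
    have h0 : s = [] := List.length_eq_zero_iff.1 (Nat.le_zero.1 hs)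
    subst h0; simp [pvUniq]
  | succ n ih =>
    intro s hs w
    match s with
    | [] => simp [pvUniq]
    | v :: t =>
      rw [pvUniq]
      have hlen : (t.dropWhile (fun x => decide (x = v))).length ≤ n := by
        have := List.length_dropWhile_le (fun x => decide (x = v)) t
        simp at hs; omega
      constructor
      · intro hw
        rcases List.mem_cons.1 hw with h | h
        · simp [h]
        · have := (ih _ hlen w).1 h
          exact List.mem_cons.2 (Or.inr ((List.dropWhile_sublist _).mem this))
      · intro hw
        rcases List.mem_cons.1 hw with h | h
        · simp [h]
        · rw [← List.takeWhile_append_dropWhile (p := fun x => decide (x = v)) (l := t)] at h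
          rcases List.mem_append.1 h with h | h
          · have := List.mem_takeWhile_imp h
            simp at this; simp [this]
          · exact List.mem_cons.2 (Or.inr ((ih _ hlen w).2 h))

-- every element of dropWhile (= v) of the tail of a sorted list is > v
theorem gt_of_dropWhile_sorted (v : Int) (t : List Int) (h : (v :: t).Pairwise (· ≤ ·)) :
    ∀ w ∈ t.dropWhile (fun x => decide (x = v)), v < w := by
  intro w hw
  have hle : v ≤ w := (List.pairwise_cons.1 h).1 w ((List.dropWhile_sublist _).mem hw)
  rcases hd : t.dropWhile (fun x => decide (x = v)) with _ | ⟨x, xs⟩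
  · simp [hd] at hw
  · have hx : ¬ (x = v) := by
      have := List.head?_dropWhile_not (fun x => decide (x = v)) t
      rw [hd] at this; simpa using this
    have hxv : v < x := by
      have hmx : x ∈ t.dropWhile (fun x => decide (x = v)) := by
        rw [hd]; exact List.mem_cons_self
      have : v ≤ x := (List.pairwise_cons.1 h).1 x ((List.dropWhile_sublist _).mem hmx)
      omega
    rw [hd] at hw
    rcases List.mem_cons.1 hw with h' | h'
    · omega
    · have hpt : (t.dropWhile (fun x => decide (x = v))).Pairwise (· ≤ ·) :=
        List.Pairwise.sublist (List.dropWhile_sublist _) (List.pairwise_cons.1 h).2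
      have : x ≤ w := by
        rw [hd] at hpt; exact (List.pairwise_cons.1 hpt).1 w h'
      omega

-- pvUniq of a sorted list is strictly increasing
theorem pairwise_pvUniq (n : Nat) : ∀ (s : List Int), s.length ≤ n → s.Pairwise (· ≤ ·) →
    (pvUniq s).Pairwise (· < ·) := by
  induction n with
  | zero =>
    intro s hs _
    have h0 : s = [] := List.length_eq_zero_iff.1 (Nat.le_zero.1 hs)
    subst h0; simp [pvUniq]
  | succ n ih =>
    intro s hs hp
    match s with
    | [] => simp [pvUniq]
    | v :: t =>
      rw [pvUniq]
      have hlen : (t.dropWhile (fun x => decide (x = v))).length ≤ n := by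
        have := List.length_dropWhile_le (fun x => decide (x = v)) t
        simp at hs; omega
      refine List.pairwise_cons.2 ⟨?_, ih _ hlen (List.Pairwise.sublist (List.dropWhile_sublist _) (List.pairwise_cons.1 hp).2)⟩
      intro w hw
      exact gt_of_dropWhile_sorted v t hp w
        ((mem_pvUniq n _ hlen w).1 hw)

-- A's inner pass: processing a duplicate-free list of present values removes one copy of each and appends them
theorem foldA_pass : ∀ (d : List Int), d.Nodup → ∀ (rem acc : List Int), (∀ i ∈ d, i ∈ rem) →
    d.foldl pvInnerA (rem, acc) = (d.foldl (fun r i => r.erase i) rem, acc ++ d) := by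
  intro d
  induction d with
  | nil => intro _ rem acc _; simp
  | cons i d' ih =>
    intro hnd rem acc hmem
    have hi : i ∈ rem := hmem i (by simp)
    have hstep : pvInnerA (rem, acc) i = (rem.erase i, acc ++ [i]) := by
      unfold pvInnerA
      rw [if_pos (by simpa using List.elem_eq_true_of_mem hi),
          PySem.List.remove?_eq_some_erase rem i hi]
    rw [List.foldl_cons, hstep, List.foldl_cons,
        ih hnd.of_cons _ _ (fun j hj => (List.mem_erase_of_ne (by
          intro h; exact (List.nodup_cons.1 hnd).1 (h ▸ hj))).2 (hmem j (by simp [hj])))]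
    simp

-- counts after erasing one copy of each member of a duplicate-free list
theorem count_foldl_erase : ∀ (d : List Int), d.Nodup → ∀ (l : List Int) (w : Int),
    (d.foldl (fun r i => r.erase i) l).count w = l.count w - (if w ∈ d then 1 else 0) := by
  intro d
  induction d with
  | nil => simp
  | cons i d' ih =>
    intro hnd l w
    rw [List.foldl_cons, ih hnd.of_cons]
    by_cases hwi : w = i
    · subst hwi
      have : w ∉ d' := (List.nodup_cons.1 hnd).1
      simp [this, List.count_erase_self]
    · rw [List.count_erase_of_ne hwi]
      simp [hwi]

-- the three shapes one step of B's scan can take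
theorem pvStepB_fresh (F Sc : List Int) (p : Option Int) (r : Int) (v : Int) (h : ¬(0 < r ∧ p = some v)) :
    pvStepB (F, Sc, p, r) v = (F ++ [v], Sc, some v, 1) := by
  simp [pvStepB, h]

theorem pvStepB_two (F Sc : List Int) (v : Int) :
    pvStepB (F, Sc, some v, 1) v = (F, Sc ++ [v], some v, 2) := by
  simp [pvStepB]

theorem pvStepB_many (F Sc : List Int) (v : Int) (r : Int) (hr : 2 ≤ r) :
    pvStepB (F, Sc, some v, r) v = (F, Sc, some v, r + 1) := by
  have h0 : r > 0 := by omega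
  have h1 : ¬(r + 1 = 1) := by omega
  have h2 : ¬(r + 1 = 2) := by omega
  simp [pvStepB, h0, h1, h2]

-- B's fold over a run of elements all equal to v, run counter already ≥ 2: state only advances the counter
theorem foldB_const2 (v : Int) : ∀ (t : List Int), (∀ x ∈ t, x = v) → ∀ (F Sc : List Int) (r : Int), 2 ≤ r →
    t.foldl pvStepB (F, Sc, some v, r) = (F, Sc, some v, r + t.length) := by
  intro t
  induction t with
  | nil => simp
  | cons x t' ih =>
    intro hall F Sc r hr
    have hx : x = v := hall x (by simp)
    subst hx
    rw [List.foldl_cons, pvStepB_many F Sc x r hr,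
        ih (fun y hy => hall y (by simp [hy])) _ _ _ (by omega)]
    simp
    omega
-- B's scan from a fresh state over a sorted list yields (ascending distinct values, ascending duplicated values)
theorem foldB_main (n : Nat) : ∀ (s : List Int), s.length ≤ n → s.Pairwise (· ≤ ·) →
    ∀ (F Sc : List Int) (p : Option Int) (r : Int), (∀ v ∈ s, ¬(0 < r ∧ p = some v)) →
    (s.foldl pvStepB (F, Sc, p, r)).1 = F ++ pvUniq s ∧
    (s.foldl pvStepB (F, Sc, p, r)).2.1 = Sc ++ (pvUniq s).filter (fun w => decide (2 ≤ s.count w)) := by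
  induction n with
  | zero =>
    intro s hs _ F Sc p r _
    have h0 : s = [] := List.length_eq_zero_iff.1 (Nat.le_zero.1 hs)
    subst h0; simp [pvUniq]
  | succ n ih =>
    intro s hs hp F Sc p r hfresh
    match s with
    | [] => simp [pvUniq]
    | v :: t =>
      set t1 := t.takeWhile (fun x => decide (x = v)) with ht1
      set t2 := t.dropWhile (fun x => decide (x = v)) with ht2
      have htsplit : t = t1 ++ t2 := (List.takeWhile_append_dropWhile).symm
      have hlen2 : t2.length ≤ n := by
        have := List.length_dropWhile_le (fun x => decide (x = v)) t
        rw [← ht2] at this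
        simp at hs; omega
      have ht1all : ∀ x ∈ t1, x = v := fun x hx => by
        have := List.mem_takeWhile_imp hx; simpa using this
      have ht2gt : ∀ w ∈ t2, v < w := gt_of_dropWhile_sorted v t hp
      have hp2 : t2.Pairwise (· ≤ ·) := List.Pairwise.sublist (List.dropWhile_sublist _) (List.pairwise_cons.1 hp).2
      -- the first step: fresh state, so a new run of length 1 starts and v joins firsts
      have hstep : pvStepB (F, Sc, p, r) v = (F ++ [v], Sc, some v, 1) :=
        pvStepB_fresh F Sc p r v (hfresh v (by simp))
      -- count bookkeeping
      have hcv2 : t2.count v = 0 := by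
        rw [List.count_eq_zero]
        intro h; exact absurd (ht2gt v h) (by omega)
      have hcv1 : t1.count v = t1.length := by
        rw [List.count_eq_length]; intro b hb; exact (ht1all b hb).symm ▸ rfl
      have hcvs : (v :: t).count v = 1 + t1.length := by
        rw [htsplit]; simp [List.count_append, hcv1, hcv2]; omega
      have hcw : ∀ w ∈ pvUniq t2, (v :: t).count w = t2.count w := by
        intro w hw
        have hwgt : v < w := ht2gt w ((mem_pvUniq n t2 hlen2 w).1 hw)
        have hwv : w ≠ v := by omega
        rw [htsplit]
        have : t1.count w = 0 := by
          rw [List.count_eq_zero]; intro h; exact hwv (ht1all w h)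
        simp [List.count_append, List.count_cons, this]
        omega
      have hfilter : (pvUniq (v :: t)).filter (fun w => decide (2 ≤ (v :: t).count w)) =
          (if t1 = [] then [] else [v]) ++ (pvUniq t2).filter (fun w => decide (2 ≤ t2.count w)) := by
        rw [pvUniq, ← ht2]
        rw [List.filter_cons]
        have hcong : (pvUniq t2).filter (fun w => decide (2 ≤ (v :: t).count w)) =
            (pvUniq t2).filter (fun w => decide (2 ≤ t2.count w)) := by
          apply List.filter_congr
          intro w hw; rw [hcw w hw]
        rcases ht1e : t1 with _ | ⟨x, t1'⟩
        · rw [if_neg (by simp [hcvs, ht1e])]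
          simpa using hcong
        · rw [if_pos (by simp [hcvs, ht1e]; omega)]
          simpa using hcong
      -- fresh restart on t2
      have hfresh2 : ∀ (r' : Int) (hr' : True) w, w ∈ t2 → ¬(0 < r' ∧ (some v : Option Int) = some w) := by
        intro r' _ w hw hc
        have := ht2gt w hw
        have : v = w := by injection hc.2
        omega
      have huniq : pvUniq (v :: t) = v :: pvUniq t2 := by rw [pvUniq, ← ht2]
      rcases ht1e : t1 with _ | ⟨x, t1'⟩
      · -- empty run continuation: go straight to t2 with run = 1
        have hfold : (v :: t).foldl pvStepB (F, Sc, p, r) = t2.foldl pvStepB (F ++ [v], Sc, some v, 1) := by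
          rw [List.foldl_cons, hstep]
          conv_lhs => rw [htsplit, ht1e]
          simp
        have hI := ih t2 hlen2 hp2 (F ++ [v]) Sc (some v) 1 (fun w hw => hfresh2 1 trivial w hw)
        rw [hfold, hI.1, hI.2, hfilter, huniq, ht1e]
        exact ⟨by simp, by simp⟩
      · -- at least one duplicate of v: the first one joins seconds, the rest only bump the counter
        have hx : x = v := ht1all x (by simp [ht1e])
        have ht1e' : t1 = v :: t1' := by rw [ht1e, hx]
        have hfold : (v :: t).foldl pvStepB (F, Sc, p, r) =
            t2.foldl pvStepB (F ++ [v], Sc ++ [v], some v, 2 + t1'.length) := by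
          rw [List.foldl_cons, hstep]
          conv_lhs => rw [htsplit, ht1e']
          rw [List.foldl_append, List.foldl_cons, pvStepB_two (F ++ [v]) Sc v,
              foldB_const2 v t1' (fun y hy => ht1all y (by simp [ht1e', hy])) _ _ _ (by omega)]
        have hI := ih t2 hlen2 hp2 (F ++ [v]) (Sc ++ [v]) (some v) (2 + t1'.length)
          (fun w hw => hfresh2 _ trivial w hw)
        rw [hfold, hI.1, hI.2, hfilter, huniq, ht1e']
        exact ⟨by simp, by simp⟩

-- the two concatenated sorted runs that A produces, named
theorem listCompressor_eq (numbers : List Int) :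
    listCompressor numbers =
      PySem.List.sorted (PySem.Set.ofList numbers) (fun i => i) false ++
      PySem.List.sorted
        (PySem.Set.ofList ((PySem.List.sorted (PySem.Set.ofList numbers) (fun i => i) false).foldl
          (fun r i => r.erase i) numbers)) (fun i => i) false := by
  unfold listCompressor
  have hrange : PySem.List.pyRange 0 2 1 = [0, 1] := by decide
  rw [hrange]
  simp only [List.foldl_cons, List.foldl_nil]
  set S1 := PySem.List.sorted (PySem.Set.ofList numbers) (fun i => i) false with hS1
  have hS1nd : S1.Nodup := ((PySem.List.sorted_perm _ _ _).nodup_iff).2 (PySem.Set.nodup_ofList _)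
  have h1 : S1.foldl pvInnerA (numbers, []) =
      (S1.foldl (fun r i => r.erase i) numbers, [] ++ S1) :=
    foldA_pass S1 hS1nd numbers []
      (fun i hi => (PySem.Set.mem_ofList ..).1 ((PySem.List.mem_sorted ..).1 hi))
  rw [h1]
  set r := S1.foldl (fun r i => r.erase i) numbers with hr
  set S2 := PySem.List.sorted (PySem.Set.ofList r) (fun i => i) false with hS2
  have hS2nd : S2.Nodup := ((PySem.List.sorted_perm _ _ _).nodup_iff).2 (PySem.Set.nodup_ofList _)
  have h2 : S2.foldl pvInnerA (r, [] ++ S1) = (S2.foldl (fun x i => x.erase i) r, ([] ++ S1) ++ S2) :=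
    foldA_pass S2 hS2nd r ([] ++ S1)
      (fun i hi => (PySem.Set.mem_ofList ..).1 ((PySem.List.mem_sorted ..).1 hi))
  rw [h2]
  simp

-- ===== VERDICT (by name: the statement is the Claim_ definition above) =====
theorem listCompressor_spec : Claim_equal_listCompressor := by
  intro numbers _
  unfold Spec_listCompressor
  rw [listCompressor_eq]
  unfold listCompressor_alt
  simp only []
  set s := PySem.List.sorted numbers (fun x => x) false with hs
  have hsp : s.Pairwise (· ≤ ·) := PySem.List.sorted_pairwise numbers _
  have hsperm : s.Perm numbers := PySem.List.sorted_perm ..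
  -- B's value
  have hB := foldB_main s.length s le_rfl hsp [] [] none 0 (by simp)
  rw [hB.1, hB.2]
  -- uniq facts
  have hmem : ∀ w, w ∈ pvUniq s ↔ w ∈ numbers := fun w =>
    (mem_pvUniq s.length s le_rfl w).trans (hsperm.mem_iff)
  have hpw : (pvUniq s).Pairwise (· < ·) := pairwise_pvUniq s.length s le_rfl hsp
  have hund : (pvUniq s).Nodup := hpw.imp (fun h => ne_of_lt h)
  -- first run: sorted(set(numbers)) = pvUniq s
  have hfirst : PySem.List.sorted (PySem.Set.ofList numbers) (fun i => i) false = pvUniq s := by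
    apply PySem.List.sorted_eq_of_perm_of_pairwise_lt
    · exact (List.perm_ext_iff_of_nodup hund (PySem.Set.nodup_ofList ..)).2
        (fun w => (hmem w).trans (PySem.Set.mem_ofList ..).symm)
    · exact hpw
  -- second run: sorted(set(remainder)) = duplicates filter of pvUniq s
  set S1 := PySem.List.sorted (PySem.Set.ofList numbers) (fun i => i) false with hS1
  have hS1nd : S1.Nodup := ((PySem.List.sorted_perm _ _ _).nodup_iff).2 (PySem.Set.nodup_ofList _)
  set r := S1.foldl (fun x i => x.erase i) numbers with hr
  have hrc : ∀ w, r.count w = numbers.count w - (if w ∈ numbers then 1 else 0) := by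
    intro w
    rw [hr, count_foldl_erase S1 hS1nd numbers w]
    congr 1
    by_cases hw : w ∈ numbers
    · rw [if_pos hw, if_pos ((PySem.List.mem_sorted ..).2 ((PySem.Set.mem_ofList ..).2 hw))]
    · rw [if_neg hw, if_neg (fun h => hw ((PySem.Set.mem_ofList ..).1 ((PySem.List.mem_sorted ..).1 h)))]
  have hscount : ∀ w, s.count w = numbers.count w := fun w => hsperm.count w
  have hsecond : PySem.List.sorted (PySem.Set.ofList r) (fun i => i) false =
      (pvUniq s).filter (fun w => decide (2 ≤ s.count w)) := by
    apply PySem.List.sorted_eq_of_perm_of_pairwise_lt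
    · apply (List.perm_ext_iff_of_nodup (hund.filter _) (PySem.Set.nodup_ofList ..)).2
      intro w
      rw [List.mem_filter, PySem.Set.mem_ofList]
      constructor
      · rintro ⟨hmemw, hcnt⟩
        rw [hmem w] at hmemw
        rw [hscount w] at hcnt
        rw [← List.count_pos_iff, hrc w, if_pos hmemw]
        simp at hcnt
        omega
      · intro hwr
        have hpos : 0 < r.count w := List.count_pos_iff.2 hwr
        rw [hrc w] at hpos
        have hw : w ∈ numbers := by
          by_contra hw
          rw [if_neg hw] at hpos
          have h0 : numbers.count w = 0 := by rwa [List.count_eq_zero]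
          omega
        rw [if_pos hw] at hpos
        refine ⟨(hmem w).2 hw, ?_⟩
        rw [hscount w]
        simp
        omega
    · exact hpw.filter _
  rw [hsecond, hfirst]
  simp
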